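-- pv_equiv track=rewrite | github.com/ldct/cp | atcoder/abc226/D/D.py | red_length
-- ===== SOURCE A (Python) =====
-- def red_length(lst):
--     lst = list(lst)
--     lst.sort()
--     ret = []
--
--     def reducible(x):
--         for d in ret:
--             if x % d == 0:
--                 return True
--         return False
--
--     for l in lst:
--         if not reducible(l):
--             ret += [l]
--     return len(ret)
-- ===== SOURCE B (Python) =====
-- def red_length(lst):
--     vals = set(lst)
--     return sum(1 for x in vals
--                if not any(y < x and y != 0 and x % y == 0 for y in vals))
-- ===== Notes on version B (the rewrite author's own statement) =====
-- stated objective: simpler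
-- what changed: Replaces the sort plus incremental greedy kept-list (inner scan over kept elements) by a direct closed characterization: count the distinct values not divisible by any strictly smaller nonzero value of the input, computed over set(lst) with no sorting and no accumulated state.
import Mathlib
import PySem

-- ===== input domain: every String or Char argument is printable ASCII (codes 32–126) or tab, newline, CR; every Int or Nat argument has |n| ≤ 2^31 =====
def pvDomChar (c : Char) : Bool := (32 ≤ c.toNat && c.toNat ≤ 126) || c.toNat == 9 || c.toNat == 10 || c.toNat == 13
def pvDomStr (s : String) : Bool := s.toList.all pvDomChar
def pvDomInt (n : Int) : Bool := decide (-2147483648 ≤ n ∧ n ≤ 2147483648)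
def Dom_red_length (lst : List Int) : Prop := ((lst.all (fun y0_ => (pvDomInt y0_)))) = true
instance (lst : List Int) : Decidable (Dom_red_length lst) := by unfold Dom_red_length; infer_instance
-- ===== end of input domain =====

-- B replaces A's sort + incremental greedy kept-list by a direct count over set(lst) of the
-- values with no strictly smaller nonzero divisor in the input (objective: simpler).

-- ===== PORT A =====
-- inner 'reducible' loop: for d in ret: if x % d == 0: return True; return False
def redReducible (ret : List Int) (x : Int) : Bool :=
  match ret with
  | [] => false
  | d :: ds => if PySem.Int.mod x d = 0 then true else redReducible ds x

def red_length (lst : List Int) : Int :=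
  let sortedLst := PySem.List.sorted lst (fun v => v) false
  let ret := sortedLst.foldl
    (fun ret l => if redReducible ret l then ret else ret ++ [l]) ([] : List Int)
  (ret.length : Int)

-- ===== PORT B =====
-- any(y < x and y != 0 and x % y == 0 for y in vals)
def altPred (vals : List Int) (x : Int) : Bool :=
  vals.any (fun y => decide (y < x) && decide (y ≠ 0) && decide (PySem.Int.mod x y = 0))

def red_length_alt (lst : List Int) : Int :=
  let vals := PySem.Set.ofList lst
  vals.foldl (fun acc x => if altPred vals x then acc else acc + 1) (0 : Int)

-- ===== PRECONDITION & SPEC =====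
-- Pre_ excludes exactly the inputs on which A raises ZeroDivisionError: 0 kept (0 present
-- with no negative element) and some element processed after it (a positive or a second 0).
def Pre_red_length (lst : List Int) : Prop :=
  0 ∈ lst → (∃ y ∈ lst, y < 0) ∨ (lst.count 0 ≤ 1 ∧ ∀ y ∈ lst, y ≤ 0)
instance (lst : List Int) : Decidable (Pre_red_length lst) := by unfold Pre_red_length; infer_instance

def pvWitness_red_length : List Int := [6, 2, 3, -4]

def Spec_red_length (lst : List Int) (out : Int) : Prop := out = red_length_alt lst
instance (lst : List Int) (out : Int) : Decidable (Spec_red_length lst out) := by unfold Spec_red_length; infer_instance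

-- ===== CLAIM (what is proved, stated in full; the proofs are below) =====
def Claim_equal_red_length : Prop := ∀ (lst : List Int), Dom_red_length lst → Pre_red_length lst → Spec_red_length lst (red_length lst)

-- ===== LEMMAS AND PROOFS =====

-- 'x has a strictly smaller nonzero divisor among L'
def Qp (L : List Int) (x : Int) : Prop := ∃ y ∈ L, y < x ∧ y ≠ 0 ∧ y ∣ x

theorem Qp_congr {L L' : List Int} (h : ∀ y, y ∈ L ↔ y ∈ L') (x : Int) : Qp L x ↔ Qp L' x := by
  constructor
  · rintro ⟨y, hy, hh⟩; exact ⟨y, (h y).mp hy, hh⟩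
  · rintro ⟨y, hy, hh⟩; exact ⟨y, (h y).mpr hy, hh⟩

theorem redReducible_iff (ret : List Int) (x : Int) :
    redReducible ret x = true ↔ ∃ d ∈ ret, d ∣ x := by
  induction ret with
  | nil => simp [redReducible]
  | cons d ds ih =>
      simp [redReducible, ih, PySem.Int.mod_eq_zero_iff_dvd]

theorem main_inv (rest : List Int) : ∀ (P acc : List Int),
    (P ++ rest).Pairwise (· ≤ ·) →
    (0 ∈ P ++ rest → ∃ y ∈ P ++ rest, y < 0) →
    acc.Nodup →
    (∀ x, x ∈ acc ↔ x ∈ P ∧ ¬ Qp P x) →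
    (∀ y ∈ P, ∃ d ∈ acc, d ∣ y) →
    (rest.foldl (fun ret l => if redReducible ret l then ret else ret ++ [l]) acc).Nodup ∧
    (∀ x, x ∈ rest.foldl (fun ret l => if redReducible ret l then ret else ret ++ [l]) acc ↔
      x ∈ P ++ rest ∧ ¬ Qp (P ++ rest) x) := by
  induction rest with
  | nil =>
      intro P acc _ _ hnd hmem _
      simpa using ⟨hnd, hmem⟩
  | cons l rest' ih =>
      intro P acc hpw h0 hnd hmem hcov
      have hPl : ∀ y ∈ P, y ≤ l := by
        have h := (List.pairwise_append.mp hpw).2.2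
        intro y hy; exact h y hy l (List.mem_cons_self ..)
      have haccP : ∀ x ∈ acc, x ∈ P := fun x hx => ((hmem x).mp hx).1
      -- 0 is never in acc
      have h0acc : (0 : Int) ∉ acc := by
        intro h0a
        obtain ⟨h0P, hnQ0⟩ := (hmem 0).mp h0a
        obtain ⟨y, hy, hylt⟩ := h0 (List.mem_append.mpr (Or.inl h0P))
        rcases List.mem_append.mp hy with hyP | hyr
        · exact hnQ0 ⟨y, hyP, hylt, by omega, dvd_zero y⟩
        · have : (0 : Int) ≤ y := (List.pairwise_append.mp hpw).2.2 0 h0P y hyr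
          omega
      have hredQ : redReducible acc l = true → l ∈ acc ∨ Qp P l := by
        intro hr
        obtain ⟨d, hd, hdvd⟩ := (redReducible_iff acc l).mp hr
        by_cases hdl : d = l
        · exact Or.inl (hdl ▸ hd)
        · refine Or.inr ⟨d, haccP d hd, ?_, ?_, hdvd⟩
          · have := hPl d (haccP d hd); omega
          · intro h; exact h0acc (h ▸ hd)
      have hQred : Qp P l → redReducible acc l = true := by
        rintro ⟨y, hy, _, _, hdvd⟩
        obtain ⟨d, hd, hdy⟩ := hcov y hy
        exact (redReducible_iff acc l).mpr ⟨d, hd, dvd_trans hdy hdvd⟩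
      -- no element already in acc acquires l as a new smaller divisor
      have hnolnew : ∀ x ∈ acc, ¬ Qp (P ++ [l]) x := by
        intro x hx hq
        obtain ⟨y, hy, hylt, hyne, hydvd⟩ := hq
        rcases List.mem_append.mp hy with hyP | hyl
        · exact ((hmem x).mp hx).2 ⟨y, hyP, hylt, hyne, hydvd⟩
        · have hyl : y = l := by simpa using hyl
          subst hyl
          have := hPl x (haccP x hx); omega
      have hpw' : ((P ++ [l]) ++ rest').Pairwise (· ≤ ·) := by
        rw [List.append_assoc]; simpa using hpw
      have h0' : 0 ∈ (P ++ [l]) ++ rest' → ∃ y ∈ (P ++ [l]) ++ rest', y < 0 := by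
        rw [List.append_assoc]; simpa using h0
      by_cases hred : redReducible acc l = true
      · -- l is reducible: acc unchanged
        have hmem' : ∀ x, x ∈ acc ↔ x ∈ P ++ [l] ∧ ¬ Qp (P ++ [l]) x := by
          intro x
          constructor
          · intro hx
            exact ⟨List.mem_append.mpr (Or.inl (haccP x hx)), hnolnew x hx⟩
          · rintro ⟨hxm, hnQ⟩
            have hnQP : ¬ Qp P x := by
              rintro ⟨y, hy, hh⟩
              exact hnQ ⟨y, List.mem_append.mpr (Or.inl hy), hh⟩
            rcases List.mem_append.mp hxm with hxP | hxl
            · exact (hmem x).mpr ⟨hxP, hnQP⟩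
            · have hxl' : x = l := by simpa using hxl
              rw [hxl']
              rcases hredQ hred with h | h
              · exact h
              · exact absurd h (hxl' ▸ hnQP)
        have hcov' : ∀ y ∈ P ++ [l], ∃ d ∈ acc, d ∣ y := by
          intro y hy
          rcases List.mem_append.mp hy with hyP | hyl
          · exact hcov y hyP
          · have hyl' : y = l := by simpa using hyl
            rw [hyl']
            exact (redReducible_iff acc l).mp hred
        have hres := ih (P ++ [l]) acc hpw' h0' hnd hmem' hcov'
        rw [List.append_assoc] at hres
        simpa [hred] using hres
      · -- l is kept: acc becomes acc ++ [l]
        have hlnacc : l ∉ acc := fun h =>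
          hred ((redReducible_iff acc l).mpr ⟨l, h, dvd_refl l⟩)
        have hnQl : ¬ Qp P l := fun h => hred (hQred h)
        have hnd' : (acc ++ [l]).Nodup := by
          rw [List.nodup_append]
          refine ⟨hnd, List.nodup_singleton l, ?_⟩
          intro a ha b hb heq
          have hbl : b = l := by simpa using hb
          exact hlnacc ((heq.trans hbl) ▸ ha)
        have hmem' : ∀ x, x ∈ acc ++ [l] ↔ x ∈ P ++ [l] ∧ ¬ Qp (P ++ [l]) x := by
          intro x
          constructor
          · intro hx
            rcases List.mem_append.mp hx with hxA | hxl
            · exact ⟨List.mem_append.mpr (Or.inl (haccP x hxA)), hnolnew x hxA⟩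
            · have hxl' : x = l := by simpa using hxl
              rw [hxl']
              refine ⟨List.mem_append.mpr (Or.inr (by simp)), ?_⟩
              rintro ⟨y, hy, hylt, hyne, hydvd⟩
              rcases List.mem_append.mp hy with hyP | hyl
              · exact hnQl ⟨y, hyP, hylt, hyne, hydvd⟩
              · have : y = l := by simpa using hyl
                omega
          · rintro ⟨hxm, hnQ⟩
            rcases List.mem_append.mp hxm with hxP | hxl
            · have hnQP : ¬ Qp P x := by
                rintro ⟨y, hy, hh⟩
                exact hnQ ⟨y, List.mem_append.mpr (Or.inl hy), hh⟩
              exact List.mem_append.mpr (Or.inl ((hmem x).mpr ⟨hxP, hnQP⟩))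
            · exact List.mem_append.mpr (Or.inr hxl)
        have hcov' : ∀ y ∈ P ++ [l], ∃ d ∈ acc ++ [l], d ∣ y := by
          intro y hy
          rcases List.mem_append.mp hy with hyP | hyl
          · obtain ⟨d, hd, hdy⟩ := hcov y hyP
            exact ⟨d, List.mem_append.mpr (Or.inl hd), hdy⟩
          · have hyl' : y = l := by simpa using hyl
            rw [hyl']
            exact ⟨l, List.mem_append.mpr (Or.inr (by simp)), dvd_refl l⟩
        have hres := ih (P ++ [l]) (acc ++ [l]) hpw' h0' hnd' hmem' hcov'
        rw [List.append_assoc] at hres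
        simpa [hred] using hres

theorem foldl_count (p : Int → Bool) (l : List Int) (acc : Int) :
    l.foldl (fun a x => if p x then a else a + 1) acc
      = acc + ((l.filter (fun x => !p x)).length : Int) := by
  induction l generalizing acc with
  | nil => simp
  | cons x xs ih =>
      by_cases h : p x = true
      · simp [h, ih]
      · simp [h, ih]; ring

theorem altPred_iff (lst : List Int) (x : Int) :
    altPred (PySem.Set.ofList lst) x = true ↔ Qp lst x := by
  simp [altPred, Qp, List.any_eq_true, PySem.Set.mem_ofList,
    PySem.Int.mod_eq_zero_iff_dvd, and_assoc]

theorem red_length_spec : Claim_equal_red_length := by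
  intro lst _ hpre
  unfold Spec_red_length
  by_cases hz : (0 : Int) ∈ lst → ∃ y ∈ lst, y < 0
  · -- the main case: 0 is never kept
    set S := PySem.List.sorted lst (fun v => v) false with hS
    have hmemS : ∀ y : Int, y ∈ S ↔ y ∈ lst := fun y =>
      PySem.List.mem_sorted lst (fun v => v) false y
    have hpw : S.Pairwise (· ≤ ·) := by
      simpa using PySem.List.sorted_pairwise lst (fun v => v)
    have h0 : 0 ∈ ([] : List Int) ++ S → ∃ y ∈ ([] : List Int) ++ S, y < 0 := by
      intro h0S
      obtain ⟨y, hy, hlt⟩ := hz ((hmemS 0).mp (by simpa using h0S))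
      exact ⟨y, by simpa using (hmemS y).mpr hy, hlt⟩
    have hres := main_inv S [] [] (by simpa using hpw) h0 (by simp)
      (by simp [Qp]) (by simp)
    obtain ⟨hndA, hmemA⟩ := hres
    set ret := S.foldl (fun ret l => if redReducible ret l then ret else ret ++ [l])
      ([] : List Int) with hret
    have hmemA' : ∀ x, x ∈ ret ↔ x ∈ lst ∧ ¬ Qp lst x := by
      intro x
      rw [hmemA x]
      simp only [List.nil_append]
      rw [Qp_congr hmemS x]
      constructor
      · rintro ⟨h1, h2⟩; exact ⟨(hmemS x).mp h1, h2⟩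
      · rintro ⟨h1, h2⟩; exact ⟨(hmemS x).mpr h1, h2⟩
    -- B's value
    set vals := PySem.Set.ofList lst with hvals
    have hB : red_length_alt lst
        = ((vals.filter (fun x => !altPred vals x)).length : Int) := by
      unfold red_length_alt
      rw [← hvals, foldl_count]
      ring
    have hndF : (vals.filter (fun x => !altPred vals x)).Nodup :=
      (PySem.Set.nodup_ofList lst).filter _
    have hpredF : ∀ x, altPred vals x = true ↔ Qp lst x := by
      intro x; rw [hvals]; exact altPred_iff lst x
    have hmemvals : ∀ x : Int, x ∈ vals ↔ x ∈ lst := by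
      intro x; rw [hvals]; exact PySem.Set.mem_ofList lst x
    have hmemF : ∀ x, x ∈ vals.filter (fun x => !altPred vals x) ↔
        x ∈ lst ∧ ¬ Qp lst x := by
      intro x
      rw [List.mem_filter]
      constructor
      · rintro ⟨h1, h2⟩
        refine ⟨(hmemvals x).mp h1, fun hq => ?_⟩
        have hc := (hpredF x).mpr hq
        simp [hc] at h2
      · rintro ⟨h1, h2⟩
        refine ⟨(hmemvals x).mpr h1, ?_⟩
        have hc : altPred vals x = false := by
          cases hb : altPred vals x
          · rfl
          · exact absurd ((hpredF x).mp hb) h2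
        simp [hc]
    have hperm : ret.Perm (vals.filter (fun x => !altPred vals x)) := by
      rw [List.perm_ext_iff_of_nodup hndA hndF]
      intro a; rw [hmemA' a, hmemF a]
    have hlen := hperm.length_eq
    show ((ret.length : Nat) : Int) = red_length_alt lst
    rw [hB, hlen]
  · -- Pre_ forces lst = [0] here
    push Not at hz
    obtain ⟨h0, hnoneg⟩ := hz
    rcases hpre h0 with ⟨y, hy, hlt⟩ | ⟨hcnt, hle⟩
    · exact absurd hlt (by have := hnoneg y hy; omega)
    · have hall : ∀ y ∈ lst, (0 : Int) = y := by
        intro y hy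
        have h1 := hnoneg y hy
        have h2 := hle y hy
        omega
      have hcl : lst.count 0 = lst.length := List.count_eq_length.mpr (by
        intro b hb
        have := hall b hb
        simp [this])
      have hlen1 : lst.length = 1 := by
        have hpos : 0 < lst.length := List.length_pos_of_mem h0
        omega
      obtain ⟨a, rfl⟩ := List.length_eq_one_iff.mp hlen1
      have : a = 0 := by have := hall a (by simp); omega
      subst this
      decide
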